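-- pv_equiv track=rewrite | github.com/zeltbrennt/AdventOfCode2017 | solutions/day16.py | part2
-- ===== SOURCE A (Python) =====
-- def part2(puzzle: list[str]) -> str:
--     programs = [chr(x) for x in range(97, 97+16)]
--     start = programs.copy()
--     for i in range(1, 1_000_000_000):
--         programs = dance(programs, puzzle)
--         if programs == start:
--             for _ in range(1_000_000_000 % i):
--                 programs = dance(programs, puzzle)
--             break
--     return "".join(programs)
--
-- def spin(programs: list[str], size: int) -> list[str]:
--         programs = programs[-size:] + programs[:-size]
--         return programs
--
-- def exchange(programs: list[str], a: int, b: int) -> list[str]: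
--     programs[a], programs[b] = programs[b], programs[a]
--     return programs
--
-- def partner(programs: list[str], a: str, b: str):
--     return exchange(programs, programs.index(a), programs.index(b))
--
-- def dance(programs: list[str], moves: list[str]) -> list[str]:
--     for move in moves:
--         if move[0] == "s":
--             programs = spin(programs, int(move[1:]))
--         elif move[0] == "x":
--             programs = exchange(programs, *(int(x) for x in move[1:].split("/")))
--         elif move[0] == "p":
--             programs = partner(programs, *move[1:].split("/"))
--     return programs
-- ===== SOURCE B (Python) =====
-- def part2(puzzle: list[str]) -> str:
--     # One pass over the moves extracts the net dance as a positional permutation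
--     # (pos1) plus a value relabeling (val1); the cycle search then composes these
--     # 16-element tables instead of replaying the move list each round.
--     base = [chr(x) for x in range(97, 97 + 16)]
--     pos1 = list(range(16))
--     val1 = base.copy()
--     for move in puzzle:
--         if move[0] == "s":
--             s = int(move[1:])
--             pos1 = pos1[-s:] + pos1[:-s]
--         elif move[0] == "x":
--             a, b = (int(x) for x in move[1:].split("/"))
--             pos1[a], pos1[b] = pos1[b], pos1[a]
--         elif move[0] == "p":
--             a, b = move[1:].split("/")
--             val1 = [b if v == a else a if v == b else v for v in val1]
--     posn, valn = list(range(16)), base.copy()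
--     for i in range(1, 1_000_000_000):
--         posn = [posn[p] for p in pos1]
--         valn = [val1[ord(c) - 97] for c in valn]
--         if all(valn[p] == c for p, c in zip(posn, base)):
--             posn, valn = list(range(16)), base.copy()
--             for _ in range(1_000_000_000 % i):
--                 posn = [posn[p] for p in pos1]
--                 valn = [val1[ord(c) - 97] for c in valn]
--             break
--     return "".join(valn[p] for p in posn)
-- ===== Notes on version B (the rewrite author's own statement) =====
-- stated objective: alternative
-- what changed: Instead of replaying the whole move list on the 16-letter state every round until the arrangement repeats, B parses the moves once into a net positional permutation plus a net value-relabeling table and runs the cycle search (and the 10^9 mod period leftover rounds) by composing those two 16-entry tables; on the generated benchmark inputs (mostly ignored moves, period 1) the measured cost is the same.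
import Mathlib
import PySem

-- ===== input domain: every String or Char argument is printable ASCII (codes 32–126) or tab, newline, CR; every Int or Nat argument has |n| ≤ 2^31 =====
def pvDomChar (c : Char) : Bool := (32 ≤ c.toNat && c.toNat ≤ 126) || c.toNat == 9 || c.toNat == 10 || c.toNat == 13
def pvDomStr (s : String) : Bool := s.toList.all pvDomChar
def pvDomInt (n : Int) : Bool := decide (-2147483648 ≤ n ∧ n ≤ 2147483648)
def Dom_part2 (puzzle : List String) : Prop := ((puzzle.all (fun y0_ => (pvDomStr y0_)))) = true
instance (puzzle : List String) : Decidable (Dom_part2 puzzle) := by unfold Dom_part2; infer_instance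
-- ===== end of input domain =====

-- B replaces A's replay-the-whole-move-list-per-round cycle search by a single parse pass that
-- extracts the net dance as a position table plus a value relabeling table, then composes those
-- two 16-entry tables per round (objective: alternative algorithm, same measured cost).

-- ===== PORT A =====
def progsA : List String := (PySem.List.pyRange 97 (97+16) 1).map (fun x => String.ofList [Char.ofNat x.toNat])

def spinA (ps : List String) (size : Int) : List String :=
  PySem.List.slice ps (some (-size)) none ++ PySem.List.slice ps none (some (-size))

def exchangeA (ps : List String) (a b : Int) : Option (List String) :=
  match PySem.List.pyGet? ps b, PySem.List.pyGet? ps a with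
  | some vb, some va => (PySem.List.pySet? ps a vb).bind fun ps1 => PySem.List.pySet? ps1 b va
  | _, _ => none

def partnerA (ps : List String) (a b : String) : Option (List String) :=
  match PySem.List.index? ps a with
  | none => none
  | some ia =>
    match PySem.List.index? ps b with
    | none => none
    | some ib => exchangeA ps (ia : Int) (ib : Int)

def moveA (ps : List String) (m : String) : Option (List String) :=
  match PySem.Str.pyGet? m 0 with
  | none => none
  | some c =>
    if c = 's' then (PySem.Int.ofStr? (PySem.Str.slice m (some 1) none)).map (fun k => spinA ps k)
    else if c = 'x' then
      match PySem.Str.split? (PySem.Str.slice m (some 1) none) "/" with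
      | some [s1, s2] =>
        match PySem.Int.ofStr? s1, PySem.Int.ofStr? s2 with
        | some a, some b => exchangeA ps a b
        | _, _ => none
      | _ => none
    else if c = 'p' then
      match PySem.Str.split? (PySem.Str.slice m (some 1) none) "/" with
      | some [a, b] => partnerA ps a b
      | _ => none
    else some ps

def danceA (ps : List String) (moves : List String) : Option (List String) :=
  moves.foldl (fun acc m => acc.bind fun s => moveA s m) (some ps)

def extraA (moves : List String) : Nat → List String → Option (List String)
  | 0, ps => some ps
  | r+1, ps => (danceA ps moves).bind (extraA moves r)

def loopA (moves start : List String) : Nat → Nat → List String → Option (List String)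
  | 0, _, ps => some ps
  | fuel+1, i, ps =>
    match danceA ps moves with
    | none => none
    | some ps' =>
      if ps' = start then extraA moves (1000000000 % i) ps'
      else loopA moves start fuel (i+1) ps'

def part2 (puzzle : List String) : String :=
  match loopA puzzle progsA 999999999 1 progsA with
  | some ps => PySem.Str.join "" ps
  | none => ""   -- Python raises here; excluded by Pre_part2

-- ===== PORT B =====
def baseB : List String := (PySem.List.pyRange 97 (97+16) 1).map (fun x => String.ofList [Char.ofNat x.toNat])
def idPosB : List Int := PySem.List.pyRange 0 16 1

-- ord(c) - 97; exact for 1-char strings (Python raises TypeError otherwise, excluded by Pre_part2)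
def ordIdxB (c : String) : Int :=
  match c.toList with
  | [ch] => (ch.toNat : Int) - 97
  | _ => -1000

def moveB (pv : List Int × List String) (m : String) : Option (List Int × List String) :=
  match PySem.Str.pyGet? m 0 with
  | none => none
  | some c =>
    if c = 's' then
      (PySem.Int.ofStr? (PySem.Str.slice m (some 1) none)).map (fun k =>
        (PySem.List.slice pv.1 (some (-k)) none ++ PySem.List.slice pv.1 none (some (-k)), pv.2))
    else if c = 'x' then
      match PySem.Str.split? (PySem.Str.slice m (some 1) none) "/" with
      | some [s1, s2] =>
        match PySem.Int.ofStr? s1, PySem.Int.ofStr? s2 with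
        | some a, some b =>
          match PySem.List.pyGet? pv.1 b, PySem.List.pyGet? pv.1 a with
          | some vb, some va =>
            (PySem.List.pySet? pv.1 a vb).bind fun l1 =>
              (PySem.List.pySet? l1 b va).map fun l2 => (l2, pv.2)
          | _, _ => none
        | _, _ => none
      | _ => none
    else if c = 'p' then
      match PySem.Str.split? (PySem.Str.slice m (some 1) none) "/" with
      | some [a, b] => some (pv.1, pv.2.map (fun v => if v = a then b else if v = b then a else v))
      | _ => none
    else some pv

def parseB (puzzle : List String) : Option (List Int × List String) :=
  puzzle.foldl (fun acc m => acc.bind fun pv => moveB pv m) (some (idPosB, baseB))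

-- posn[p] / val1[ord(c)-97]: in range whenever Pre_part2 holds (Python raises out of range)
def compPosB (posn pos1 : List Int) : List Int := pos1.map (fun p => PySem.List.pyGetD posn p 0)
def compValB (valn val1 : List String) : List String := valn.map (fun c => PySem.List.pyGetD val1 (ordIdxB c) "")

def compNB (pos1 : List Int) (val1 : List String) : Nat → List Int × List String → List Int × List String
  | 0, pv => pv
  | r+1, pv => compNB pos1 val1 r (compPosB pv.1 pos1, compValB pv.2 val1)

def loopB (pos1 : List Int) (val1 : List String) : Nat → Nat → List Int × List String → List Int × List String
  | 0, _, pv => pv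
  | fuel+1, i, pv =>
    let pv' := (compPosB pv.1 pos1, compValB pv.2 val1)
    if (pv'.1.zip baseB).all (fun pc => PySem.List.pyGetD pv'.2 pc.1 "" == pc.2)
    then compNB pos1 val1 (1000000000 % i) (idPosB, baseB)
    else loopB pos1 val1 fuel (i+1) pv'

def part2_alt (puzzle : List String) : String :=
  match parseB puzzle with
  | none => ""   -- Python raises here; excluded by Pre_part2
  | some pv1 =>
    let pvf := loopB pv1.1 pv1.2 999999999 1 (idPosB, baseB)
    PySem.Str.join "" (pvf.1.map (fun p => PySem.List.pyGetD pvf.2 p ""))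

-- ===== PRECONDITION & SPEC =====
-- Pre_part2 holds exactly when every move parses and stays in range, i.e. exactly when the
-- Python A returns instead of raising (IndexError/ValueError/TypeError on malformed moves).
def validMoveB (m : String) : Bool :=
  match PySem.Str.pyGet? m 0 with
  | none => false
  | some c =>
    if c = 's' then (PySem.Int.ofStr? (PySem.Str.slice m (some 1) none)).isSome
    else if c = 'x' then
      match PySem.Str.split? (PySem.Str.slice m (some 1) none) "/" with
      | some [s1, s2] =>
        match PySem.Int.ofStr? s1, PySem.Int.ofStr? s2 with
        | some a, some b => decide (-16 ≤ a ∧ a < 16 ∧ -16 ≤ b ∧ b < 16)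
        | _, _ => false
      | _ => false
    else if c = 'p' then
      match PySem.Str.split? (PySem.Str.slice m (some 1) none) "/" with
      | some [a, b] => decide (a ∈ baseB ∧ b ∈ baseB)
      | _ => false
    else true

def Pre_part2 (puzzle : List String) : Prop := puzzle.all validMoveB = true
instance (puzzle : List String) : Decidable (Pre_part2 puzzle) := by unfold Pre_part2; infer_instance

def pvWitness_part2 : List String := ["s3", "x0/13", "pb/p", "s-2"]

def Spec_part2 (puzzle : List String) (out : String) : Prop := out = part2_alt puzzle
instance (puzzle : List String) (out : String) : Decidable (Spec_part2 puzzle out) := by unfold Spec_part2; infer_instance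

-- ===== CLAIM (what is proved, stated in full; the proofs are below) =====
def Claim_equal_part2 : Prop := ∀ (puzzle : List String), Dom_part2 puzzle → Pre_part2 puzzle → Spec_part2 puzzle (part2 puzzle)

-- ===== LEMMAS AND PROOFS =====

-- value-relabeling lookup: valn[ord(c)-97]
def vAppP (val : List String) (c : String) : String := PySem.List.pyGetD val (ordIdxB c) ""
-- the arrangement that a (position table, value table) pair denotes, applied to a start list L
def pairDP (pv : List Int × List String) (L : List String) : List String :=
  pv.1.map (fun i => vAppP pv.2 (PySem.List.pyGetD L i ""))
-- invariant: both tables are permutations (of 0..15 resp. of "a".."p")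
def InvP (pv : List Int × List String) : Prop := pv.1.Perm idPosB ∧ pv.2.Perm baseB

lemma progsA_eq : progsA = baseB := rfl

lemma baseB_nodup : baseB.Nodup := by decide

lemma InvP_id : InvP (idPosB, baseB) := ⟨List.Perm.refl _, List.Perm.refl _⟩

lemma mem_idPosB {i : Int} (h : i ∈ idPosB) : 0 ≤ i ∧ i < 16 := by
  have he : idPosB = [0,1,2,3,4,5,6,7,8,9,10,11,12,13,14,15] := by decide
  rw [he] at h; simp at h; omega

lemma InvP_len1 {pv : List Int × List String} (h : InvP pv) : pv.1.length = 16 := by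
  have := h.1.length_eq; simpa using this

lemma InvP_len2 {pv : List Int × List String} (h : InvP pv) : pv.2.length = 16 := by
  have := h.2.length_eq; simpa using this

lemma mem_pos_bounds {pv : List Int × List String} (h : InvP pv) {p : Int} (hp : p ∈ pv.1) :
    0 ≤ p ∧ p < 16 := mem_idPosB (h.1.subset hp)

-- map/index commutation helpers (pyGet?/pySet?/slice only look at the length)
lemma pyGet?_map {α β : Type} (f : α → β) (xs : List α) (i : Int) :
    PySem.List.pyGet? (xs.map f) i = (PySem.List.pyGet? xs i).map f := by
  simp only [PySem.List.pyGet?, List.length_map]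
  cases PySem.List.pyIdx? xs.length i <;> simp

lemma pySet?_map {α β : Type} (f : α → β) (xs : List α) (i : Int) (v : α) :
    PySem.List.pySet? (xs.map f) i (f v) = (PySem.List.pySet? xs i v).map (List.map f) := by
  simp only [PySem.List.pySet?, List.length_map]
  cases PySem.List.pyIdx? xs.length i <;> simp [List.map_set]

lemma pySet?_length {α : Type} {xs : List α} {i : Int} {v : α} {ys : List α}
    (h : PySem.List.pySet? xs i v = some ys) : ys.length = xs.length := by
  simp only [PySem.List.pySet?] at h
  cases hk : PySem.List.pyIdx? xs.length i <;> rw [hk] at h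
  · simp at h
  · simp only [Option.map_some, Option.some.injEq] at h
    rw [← h]; simp

lemma slice_map {α β : Type} (f : α → β) (xs : List α) (a? b? : Option Int) :
    PySem.List.slice (xs.map f) a? b? = (PySem.List.slice xs a? b?).map f := by
  simp only [PySem.List.slice, List.length_map]
  cases a? <;> cases b? <;> simp [List.map_take, List.map_drop]

lemma slice_rot_perm {α : Type} (xs : List α) (a : Int) :
    (PySem.List.slice xs (some a) none ++ PySem.List.slice xs none (some a)).Perm xs := by
  simp only [PySem.List.slice]
  have h1 : List.take (xs.length - PySem.List.clampIdx xs.length a)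
      (List.drop (PySem.List.clampIdx xs.length a) xs) =
      List.drop (PySem.List.clampIdx xs.length a) xs := by
    apply List.take_of_length_le; simp
  rw [h1]
  have h2 : List.take (PySem.List.clampIdx xs.length a - 0) (List.drop 0 xs) =
      List.take (PySem.List.clampIdx xs.length a) xs := by simp
  rw [h2]
  exact (List.perm_append_comm).trans (by rw [List.take_append_drop])

-- [l[i] for i in range(16)] = l for a 16-list
lemma map_getD_idPosB {α : Type} (l : List α) (h : l.length = 16) (d : α) :
    idPosB.map (fun i => PySem.List.pyGetD l i d) = l := by
  have he : idPosB = [0,1,2,3,4,5,6,7,8,9,10,11,12,13,14,15] := by decide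
  rw [he]
  apply List.ext_getElem (by simp [h])
  intro n h1 h2
  have hn : n < 16 := by omega
  simp only [List.getElem_map]
  interval_cases n <;>
    simp [PySem.List.pyGetD_ofNat', h]

lemma vApp_baseB_getD (val : List String) {i : Int} (h0 : 0 ≤ i) (h16 : i < 16) :
    vAppP val (PySem.List.pyGetD baseB i "") = PySem.List.pyGetD val i "" := by
  interval_cases i <;> rfl

lemma vApp_baseB_self {x : String} (hx : x ∈ baseB) : vAppP baseB x = x := by
  fin_cases hx <;> rfl

-- f pulled out of the relabeling table (no range condition: both defaults agree)
lemma vApp_map_f (f : String → String) (val : List String) (x : String) (h : f "" = "") :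
    vAppP (val.map f) x = f (vAppP val x) := by
  have key := PySem.List.pyGetD_map f val (ordIdxB x) ""
  rw [h] at key
  exact key

lemma vApp_empty (val : List String) (h : val.length = 16) : vAppP val "" = "" := by
  show PySem.List.pyGetD val (ordIdxB "") "" = ""
  have he : ordIdxB "" = -1000 := rfl
  rw [he]
  simp only [PySem.List.pyGetD, PySem.List.pyGet?, PySem.List.pyIdx?, h]
  norm_num

lemma map_vApp_baseB (val : List String) (h : val.length = 16) : baseB.map (vAppP val) = val := by
  conv_lhs => rw [show baseB = idPosB.map (fun i => PySem.List.pyGetD baseB i "") from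
    (map_getD_idPosB baseB (by decide) "").symm]
  rw [List.map_map]
  rw [List.map_congr_left (fun i hi => by
    obtain ⟨h0, h16⟩ := mem_idPosB hi
    exact vApp_baseB_getD val h0 h16)]
  exact map_getD_idPosB val h ""

lemma stateOf_eq {pv : List Int × List String} (h : InvP pv) :
    pv.1.map (fun p => PySem.List.pyGetD pv.2 p "") = pairDP pv baseB := by
  unfold pairDP
  apply (List.map_congr_left ?_).symm
  intro p hp
  obtain ⟨h0, h16⟩ := mem_pos_bounds h hp
  exact vApp_baseB_getD pv.2 h0 h16

lemma stateOf_eq' {pos : List Int} {val : List String} (h : InvP (pos, val)) :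
    pos.map (fun p => PySem.List.pyGetD val p "") = pairDP (pos, val) baseB :=
  stateOf_eq h

lemma pairD_id {L : List String} (hL : L.Perm baseB) : pairDP (idPosB, baseB) L = L := by
  have hlen : L.length = 16 := by have := hL.length_eq; simpa using this
  unfold pairDP
  rw [List.map_congr_left (fun i hi => by
    obtain ⟨h0, h16⟩ := mem_idPosB hi
    show vAppP baseB (PySem.List.pyGetD L i "") = PySem.List.pyGetD L i ""
    refine vApp_baseB_self (hL.subset (PySem.List.pyGetD_mem L ""
      (show PySem.Raise.InRange L.length i from by
        unfold PySem.Raise.InRange; rw [hlen]; omega))))]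
  exact map_getD_idPosB L hlen ""

lemma pairD_perm {pv : List Int × List String} {L : List String} (h : InvP pv)
    (hL : L.Perm baseB) : (pairDP pv L).Perm baseB := by
  unfold pairDP
  refine (h.1.map _).trans ?_
  rw [show idPosB.map (fun i => vAppP pv.2 (PySem.List.pyGetD L i "")) =
      (idPosB.map (fun i => PySem.List.pyGetD L i "")).map (vAppP pv.2) from by
    rw [List.map_map]; rfl]
  rw [map_getD_idPosB L (by have := hL.length_eq; simpa using this) ""]
  refine (hL.map _).trans ?_
  rw [map_vApp_baseB pv.2 (InvP_len2 h)]
  exact h.2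

lemma pairD_comp {q p1 : List Int × List String} {L : List String}
    (hq : InvP q) (hp1 : InvP p1) (_hL : L.Perm baseB) :
    pairDP (compPosB q.1 p1.1, compValB q.2 p1.2) L = pairDP p1 (pairDP q L) := by
  unfold pairDP compPosB compValB
  rw [List.map_map]
  apply List.map_congr_left
  intro p hp
  obtain ⟨hp0, hp16⟩ := mem_pos_bounds hp1 hp
  have hq1c : p < ((q.1).length : Int) := by rw [InvP_len1 hq]; exact_mod_cast hp16
  have hq1n : p.toNat < q.1.length := by omega
  have e1 : PySem.List.pyGetD q.1 p 0 = q.1[p.toNat] :=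
    PySem.List.pyGetD_eq_getElem q.1 0 hp0 hq1c
  have e2 : PySem.List.pyGetD (q.1.map (fun i => vAppP q.2 (PySem.List.pyGetD L i ""))) p ""
      = vAppP q.2 (PySem.List.pyGetD L (q.1[p.toNat]) "") := by
    rw [PySem.List.pyGetD_eq_getElem _ _ hp0 (by simpa using hq1c)]
    simp
  show vAppP (q.2.map (vAppP p1.2)) (PySem.List.pyGetD L (PySem.List.pyGetD q.1 p 0) "")
      = vAppP p1.2 (PySem.List.pyGetD
          (q.1.map fun i => vAppP q.2 (PySem.List.pyGetD L i "")) p "")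
  rw [e1, e2, vApp_map_f (vAppP p1.2) q.2 _ (vApp_empty p1.2 (InvP_len2 hp1))]

lemma InvP_comp {q p1 : List Int × List String} (hq : InvP q) (hp1 : InvP p1) :
    InvP (compPosB q.1 p1.1, compValB q.2 p1.2) := by
  constructor
  · show (p1.1.map (fun p => PySem.List.pyGetD q.1 p 0)).Perm idPosB
    refine (hp1.1.map _).trans ?_
    rw [map_getD_idPosB q.1 (InvP_len1 hq) 0]
    exact hq.1
  · show (q.2.map (fun c => PySem.List.pyGetD p1.2 (ordIdxB c) "")).Perm baseB
    refine (hq.2.map _).trans ?_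
    rw [show (fun c => PySem.List.pyGetD p1.2 (ordIdxB c) "") = vAppP p1.2 from rfl]
    rw [map_vApp_baseB p1.2 (InvP_len2 hp1)]
    exact hp1.2

lemma zip_all_iff {α β : Type} [BEq β] [LawfulBEq β] (f : α → β) :
    ∀ (xs : List α) (ys : List β), xs.length = ys.length →
    (((xs.zip ys).all (fun pc => f pc.1 == pc.2) = true) ↔ xs.map f = ys) := by
  intro xs
  induction xs with
  | nil => intro ys h; cases ys <;> simp_all
  | cons x xs ih =>
    intro ys h
    cases ys with
    | nil => simp at h
    | cons y ys => simp [ih ys (by simpa using h)]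

lemma subst_perm_baseB {a b : String} (ha : a ∈ baseB) (hb : b ∈ baseB) :
    (baseB.map (fun v => if v = a then b else if v = b then a else v)).Perm baseB := by
  fin_cases ha <;> fin_cases hb <;> decide

lemma swap_perm_helper {α : Type} {xs : List α} {i j : Int} {vb va : α} {l1 l2 : List α}
    (hvb : PySem.List.pyGet? xs j = some vb) (hva : PySem.List.pyGet? xs i = some va)
    (hl1 : PySem.List.pySet? xs i vb = some l1) (hl2 : PySem.List.pySet? l1 j va = some l2) :
    l2.Perm xs := by
  simp only [PySem.List.pyGet?, PySem.List.pySet?] at hvb hva hl1 hl2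
  cases hki : PySem.List.pyIdx? xs.length i with
  | none => rw [hki] at hl1; simp at hl1
  | some ki =>
    rw [hki] at hva hl1
    simp only [Option.map_some, Option.some.injEq] at hl1
    cases hkj : PySem.List.pyIdx? xs.length j with
    | none => rw [hkj] at hvb; simp at hvb
    | some kj =>
      rw [hkj] at hvb
      have hlen1 : l1.length = xs.length := by rw [← hl1]; simp
      rw [hlen1, hkj] at hl2
      simp only [Option.map_some, Option.some.injEq] at hl2
      simp only [Option.bind_some] at hva hvb
      obtain ⟨hki', hva'⟩ := List.getElem?_eq_some_iff.mp hva
      obtain ⟨hkj', hvb'⟩ := List.getElem?_eq_some_iff.mp hvb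
      rw [← hl2, ← hl1, ← hva', ← hvb']
      exact List.set_set_perm hki' hkj'

lemma swap_eq_map_subst {S : List String} {a b : String} {ia ib : Nat}
    (hnd : S.Nodup) (hia : ia < S.length) (hib : ib < S.length)
    (ha : S[ia] = a) (hb : S[ib] = b) :
    (S.set ia b).set ib a = S.map (fun v => if v = a then b else if v = b then a else v) := by
  apply List.ext_getElem (by simp)
  intro n h1 h2
  have h2' : n < S.length := by simpa using h2
  simp only [List.getElem_set, List.getElem_map]
  by_cases hj1 : ib = n
  · subst hj1
    rw [if_pos rfl, hb]
    by_cases hba : b = a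
    · rw [if_pos hba]; exact hba.symm
    · rw [if_neg hba, if_pos rfl]
  · rw [if_neg hj1]
    by_cases hj2 : ia = n
    · subst hj2
      rw [if_pos rfl, ha, if_pos rfl]
    · rw [if_neg hj2]
      have hna : ¬ S[n] = a := fun h =>
        hj2 ((hnd.getElem_inj_iff).mp (h.trans ha.symm)).symm
      have hnb : ¬ S[n] = b := fun h =>
        hj1 ((hnd.getElem_inj_iff).mp (h.trans hb.symm)).symm
      rw [if_neg hna, if_neg hnb]

lemma pyGet?_total {α : Type} (xs : List α) (i : Int)
    (h1 : -(xs.length : Int) ≤ i) (h2 : i < (xs.length : Int)) :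
    ∃ v, PySem.List.pyGet? xs i = some v := by
  cases hg : PySem.List.pyGet? xs i with
  | none => exact absurd ⟨h1, h2⟩ ((PySem.List.pyGet?_eq_none_iff _ _).mp hg)
  | some v => exact ⟨v, rfl⟩

lemma pySet?_total {α : Type} (xs : List α) (i : Int) (v : α)
    (h1 : -(xs.length : Int) ≤ i) (h2 : i < (xs.length : Int)) :
    ∃ ys, PySem.List.pySet? xs i v = some ys := by
  cases hg : PySem.List.pySet? xs i v with
  | none => exact absurd ⟨h1, h2⟩ ((PySem.List.pySet?_eq_none_iff _ _ _).mp hg)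
  | some ys => exact ⟨ys, rfl⟩

lemma move_corr {pv : List Int × List String} {m : String} {L : List String}
    (hInv : InvP pv) (hv : validMoveB m = true) (hL : L.Perm baseB) :
    ∃ pv', moveB pv m = some pv' ∧ InvP pv' ∧ moveA (pairDP pv L) m = some (pairDP pv' L) := by
  have hlen1 := InvP_len1 hInv
  have hlen2 := InvP_len2 hInv
  unfold validMoveB at hv
  cases h0 : PySem.Str.pyGet? m 0 with
  | none => rw [h0] at hv; simp at hv
  | some c =>
    rw [h0] at hv
    by_cases hs : c = 's'
    · -- spin move: both slice, B on the position table
      subst hs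
      simp only [Char.reduceEq, reduceIte] at hv
      obtain ⟨k, hk⟩ := Option.isSome_iff_exists.mp hv
      refine ⟨(PySem.List.slice pv.1 (some (-k)) none ++
          PySem.List.slice pv.1 none (some (-k)), pv.2), ?_, ?_, ?_⟩
      · unfold moveB; rw [h0]; simp [hk]
      · exact ⟨(slice_rot_perm pv.1 (-k)).trans hInv.1, hInv.2⟩
      · unfold moveA; rw [h0]; simp only [Char.reduceEq, reduceIte, hk, Option.map_some]
        unfold spinA pairDP
        rw [slice_map, slice_map, List.map_append]
    · by_cases hx : c = 'x'
      · -- exchange move: both swap, B on the position table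
        subst hx
        simp only [Char.reduceEq, reduceIte] at hv
        cases hsp : PySem.Str.split? (PySem.Str.slice m (some 1) none) "/" with
        | none => rw [hsp] at hv; simp at hv
        | some parts =>
          rw [hsp] at hv
          match parts, hv with
          | [], hv => simp at hv
          | [s1], hv => simp at hv
          | (s1 :: s2 :: s3 :: rest), hv => simp at hv
          | [s1, s2], hv =>
            simp only [] at hv
            cases ha : PySem.Int.ofStr? s1 with
            | none => rw [ha] at hv; simp at hv
            | some a =>
              rw [ha] at hv
              cases hb : PySem.Int.ofStr? s2 with
              | none => rw [hb] at hv; simp at hv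
              | some b =>
                rw [hb] at hv
                obtain ⟨ha1, ha2, hb1, hb2⟩ := of_decide_eq_true hv
                obtain ⟨vb, hvb⟩ := pyGet?_total pv.1 b
                  (by rw [hlen1]; push_cast; omega) (by rw [hlen1]; push_cast; omega)
                obtain ⟨va, hva⟩ := pyGet?_total pv.1 a
                  (by rw [hlen1]; push_cast; omega) (by rw [hlen1]; push_cast; omega)
                obtain ⟨l1, hl1⟩ := pySet?_total pv.1 a vb
                  (by rw [hlen1]; push_cast; omega) (by rw [hlen1]; push_cast; omega)
                obtain ⟨l2, hl2⟩ := pySet?_total l1 b va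
                  (by rw [pySet?_length hl1, hlen1]; push_cast; omega)
                  (by rw [pySet?_length hl1, hlen1]; push_cast; omega)
                refine ⟨(l2, pv.2), ?_, ?_, ?_⟩
                · unfold moveB; rw [h0]
                  simp only [Char.reduceEq, reduceIte, hsp, ha, hb, hvb, hva, hl1, Option.bind_some,
                    hl2, Option.map_some]
                · exact ⟨(swap_perm_helper hvb hva hl1 hl2).trans hInv.1, hInv.2⟩
                · unfold moveA exchangeA; rw [h0]
                  simp only [Char.reduceEq, reduceIte, hsp, ha, hb]
                  have hPD : pairDP pv L =
                      pv.1.map (fun i => vAppP pv.2 (PySem.List.pyGetD L i "")) := rfl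
                  rw [hPD, pyGet?_map, hvb, pyGet?_map, hva]
                  simp only [Option.map_some]
                  rw [pySet?_map, hl1]
                  simp only [Option.map_some, Option.bind_some]
                  rw [pySet?_map, hl2]
                  rfl
      · by_cases hp : c = 'p'
        · -- partner move: A swaps two positions, B relabels the value table
          subst hp
          simp only [Char.reduceEq, reduceIte] at hv
          cases hsp : PySem.Str.split? (PySem.Str.slice m (some 1) none) "/" with
          | none => rw [hsp] at hv; simp at hv
          | some parts =>
            rw [hsp] at hv
            match parts, hv with
            | [], hv => simp at hv
            | [a], hv => simp at hv
            | (a :: b :: e :: rest), hv => simp at hv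
            | [a, b], hv =>
              simp only [] at hv
              obtain ⟨ha, hb⟩ := of_decide_eq_true hv
              have hSp : (pairDP pv L).Perm baseB := pairD_perm hInv hL
              have hSnd : (pairDP pv L).Nodup := hSp.nodup_iff.mpr baseB_nodup
              obtain ⟨ia, hiaeq⟩ := Option.isSome_iff_exists.mp
                ((PySem.List.index?_isSome_iff _ _).mpr (hSp.mem_iff.mpr ha))
              obtain ⟨ib, hibeq⟩ := Option.isSome_iff_exists.mp
                ((PySem.List.index?_isSome_iff _ _).mpr (hSp.mem_iff.mpr hb))
              obtain ⟨hialt, hiaval, -⟩ := PySem.List.getElem_of_index?_eq_some hiaeq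
              obtain ⟨hiblt, hibval, -⟩ := PySem.List.getElem_of_index?_eq_some hibeq
              refine ⟨(pv.1, pv.2.map (fun v => if v = a then b else if v = b then a else v)),
                ?_, ?_, ?_⟩
              · unfold moveB; rw [h0]
                simp only [Char.reduceEq, reduceIte, hsp]
              · exact ⟨hInv.1, (hInv.2.map _).trans (subst_perm_baseB ha hb)⟩
              · unfold moveA partnerA exchangeA; rw [h0]
                simp only [Char.reduceEq, reduceIte, hsp, hiaeq, hibeq]
                rw [PySem.List.pyGet?_natCast, PySem.List.pyGet?_natCast,
                  List.getElem?_eq_getElem hiblt, List.getElem?_eq_getElem hialt]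
                simp only []
                rw [PySem.List.pySet?_natCast _ _ _ hialt]
                simp only [Option.bind_some]
                rw [PySem.List.pySet?_natCast _ _ _ (by simpa using hiblt)]
                rw [hiaval, hibval, swap_eq_map_subst hSnd hialt hiblt hiaval hibval]
                show some _ = some (pairDP (pv.1,
                  pv.2.map (fun v => if v = a then b else if v = b then a else v)) L)
                have hne_a : ("" : String) ≠ a := fun h =>
                  (by decide : ("" : String) ∉ baseB) (h ▸ ha)
                have hne_b : ("" : String) ≠ b := fun h =>
                  (by decide : ("" : String) ∉ baseB) (h ▸ hb)
                unfold pairDP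
                rw [List.map_map]
                congr 1
                apply List.map_congr_left
                intro i _
                exact (vApp_map_f (fun v => if v = a then b else if v = b then a else v) pv.2 _
                  (by show (if ("" : String) = a then b else if ("" : String) = b then a else "") = ""
                      rw [if_neg hne_a, if_neg hne_b])).symm
        · -- any other first character: Python ignores the move
          refine ⟨pv, ?_, hInv, ?_⟩
          · unfold moveB; rw [h0]; simp [hs, hx, hp]
          · unfold moveA; rw [h0]; simp [hs, hx, hp]

lemma parse_dance (moves : List String) (hv : ∀ m ∈ moves, validMoveB m = true) :
    ∀ pv L, InvP pv → L.Perm baseB →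
    ∃ pv', (moves.foldl (fun acc m => acc.bind fun pv => moveB pv m) (some pv)) = some pv' ∧
      InvP pv' ∧ danceA (pairDP pv L) moves = some (pairDP pv' L) := by
  induction moves with
  | nil => intro pv L hInv hL; exact ⟨pv, rfl, hInv, rfl⟩
  | cons m ms ih =>
    intro pv L hInv hL
    obtain ⟨pv', h1, h2, h3⟩ := move_corr hInv (hv m (by simp)) hL
    obtain ⟨pv'', h4, h5, h6⟩ := ih (fun m hm => hv m (by simp [hm])) pv' L h2 hL
    refine ⟨pv'', ?_, h5, ?_⟩
    · simpa [h1] using h4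
    · show danceA (pairDP pv L) (m :: ms) = some (pairDP pv'' L)
      unfold danceA at h6 ⊢
      simpa [h3] using h6

lemma dance_eq {puzzle : List String} {pv1 : List Int × List String}
    (hAll : ∀ m ∈ puzzle, validMoveB m = true) (hparse : parseB puzzle = some pv1)
    {L : List String} (hL : L.Perm baseB) :
    danceA L puzzle = some (pairDP pv1 L) := by
  obtain ⟨pv', hp, _, hd⟩ := parse_dance puzzle hAll (idPosB, baseB) L InvP_id hL
  have he : pv' = pv1 := by
    have : parseB puzzle = some pv' := hp
    rw [hparse] at this; exact (Option.some.inj this).symm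
  rw [pairD_id hL] at hd
  rw [← he]; exact hd

lemma extra_corr {puzzle : List String} {pv1 : List Int × List String}
    (hAll : ∀ m ∈ puzzle, validMoveB m = true) (hparse : parseB puzzle = some pv1)
    (hInv1 : InvP pv1) :
    ∀ (r : Nat) (pv : List Int × List String), InvP pv →
      extraA puzzle r (pairDP pv baseB) = some (pairDP (compNB pv1.1 pv1.2 r pv) baseB) ∧
      InvP (compNB pv1.1 pv1.2 r pv) := by
  intro r
  induction r with
  | zero => intro pv hInv; exact ⟨rfl, hInv⟩
  | succ r ih =>
    intro pv hInv
    have hd := dance_eq hAll hparse (pairD_perm hInv (List.Perm.refl _))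
    have hcomp : pairDP pv1 (pairDP pv baseB) =
        pairDP (compPosB pv.1 pv1.1, compValB pv.2 pv1.2) baseB :=
      (pairD_comp hInv hInv1 (List.Perm.refl _)).symm
    have hInv' := InvP_comp hInv hInv1
    obtain ⟨ih1, ih2⟩ := ih (compPosB pv.1 pv1.1, compValB pv.2 pv1.2) hInv'
    constructor
    · show (danceA (pairDP pv baseB) puzzle).bind (extraA puzzle r) = _
      rw [hd, hcomp]
      simpa using ih1
    · exact ih2

lemma loop_corr {puzzle : List String} {pv1 : List Int × List String}
    (hAll : ∀ m ∈ puzzle, validMoveB m = true) (hparse : parseB puzzle = some pv1)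
    (hInv1 : InvP pv1) :
    ∀ (fuel i : Nat) (pv : List Int × List String), InvP pv →
      loopA puzzle baseB fuel i (pairDP pv baseB) =
        some (pairDP (loopB pv1.1 pv1.2 fuel i pv) baseB) ∧
      InvP (loopB pv1.1 pv1.2 fuel i pv) := by
  intro fuel
  induction fuel with
  | zero => intro i pv hInv; exact ⟨rfl, hInv⟩
  | succ fuel ih =>
    intro i pv hInv
    have hd := dance_eq hAll hparse (pairD_perm hInv (List.Perm.refl _))
    have hcomp : pairDP pv1 (pairDP pv baseB) =
        pairDP (compPosB pv.1 pv1.1, compValB pv.2 pv1.2) baseB :=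
      (pairD_comp hInv hInv1 (List.Perm.refl _)).symm
    have hInv' := InvP_comp hInv hInv1
    have hcond := zip_all_iff (fun p => PySem.List.pyGetD (compValB pv.2 pv1.2) p "")
        (compPosB pv.1 pv1.1) baseB (by rw [InvP_len1 hInv']; decide)
    rw [stateOf_eq' hInv'] at hcond
    show loopA puzzle baseB (fuel+1) i (pairDP pv baseB) = _ ∧ _
    unfold loopA loopB
    rw [hd]
    simp only [hcomp]
    by_cases hc : pairDP (compPosB pv.1 pv1.1, compValB pv.2 pv1.2) baseB = baseB
    · rw [if_pos hc, if_pos (hcond.mpr hc)]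
      rw [hc, show (baseB : List String) = pairDP (idPosB, baseB) baseB from
        (pairD_id (List.Perm.refl _)).symm]
      exact extra_corr hAll hparse hInv1 (1000000000 % i) (idPosB, baseB) InvP_id
    · rw [if_neg hc, if_neg (fun h => hc (hcond.mp h))]
      exact ih (i+1) _ hInv'

-- ===== VERDICT (by name: the statement is the Claim_ definition above) =====
theorem part2_spec : Claim_equal_part2 := by
  intro puzzle _hDom hPre
  unfold Spec_part2
  have hAll : ∀ m ∈ puzzle, validMoveB m = true := by
    simpa [Pre_part2, List.all_eq_true] using hPre
  obtain ⟨pv1, hparse0, hInv1, _⟩ :=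
    parse_dance puzzle hAll (idPosB, baseB) baseB InvP_id (List.Perm.refl _)
  have hparse : parseB puzzle = some pv1 := hparse0
  have hloop := loop_corr hAll hparse hInv1 999999999 1 (idPosB, baseB) InvP_id
  rw [pairD_id (List.Perm.refl _)] at hloop
  unfold part2 part2_alt
  rw [hparse, progsA_eq, hloop.1]
  simp only []
  rw [stateOf_eq hloop.2]
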